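-- pv_equiv track=rewrite | github.com/mdzeeshan-2/Python-Task | python/task.py | calculate_discounts
-- ===== SOURCE A (Python) =====
-- def calculate_discounts(products, subtotal):
--     discount_name = ""
--     discount_amount = 0
--
--     if subtotal > 200:
--         discount_name = "flat_10_discount"
--         discount_amount = 10
--     else:
--         for name, product in products.items():
--             if product["quantity"] > 10:
--                 discount_name = "bulk_5_discount"
--                 discount_amount = round(product["amount"] * 0.05)
--                 break
--
--         if sum(p["quantity"] for p in products.values()) > 20:
--             new_discount = round(subtotal * 0.1)
--             if new_discount > discount_amount:
--                 discount_name = "bulk_10_discount"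
--                 discount_amount = new_discount
--
--     return discount_name, discount_amount
-- ===== SOURCE B (Python) =====
-- def calculate_discounts(products, subtotal):
--     if subtotal > 200:
--         return "flat_10_discount", 10
--     total_quantity = 0
--     first_amount = None
--     for product in products.values():
--         q = product["quantity"]
--         total_quantity += q
--         if first_amount is None and q > 10:
--             first_amount = product["amount"]
--     if first_amount is None:
--         name, amount = "", 0
--     else:
--         name, amount = "bulk_5_discount", round(first_amount * 0.05)
--     if total_quantity > 20:
--         new_discount = round(subtotal * 0.1)
--         if new_discount > amount:
--             name, amount = "bulk_10_discount", new_discount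
--     return name, amount
-- ===== Notes on version B (the rewrite author's own statement) =====
-- stated objective: alternative
-- what changed: A's early-break scan for a bulk product plus a second full generator-sum over all quantities are fused into one accumulating traversal (total quantity + first qualifying amount remembered in one pass), with the discount decision made once after the loop.
import Mathlib
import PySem

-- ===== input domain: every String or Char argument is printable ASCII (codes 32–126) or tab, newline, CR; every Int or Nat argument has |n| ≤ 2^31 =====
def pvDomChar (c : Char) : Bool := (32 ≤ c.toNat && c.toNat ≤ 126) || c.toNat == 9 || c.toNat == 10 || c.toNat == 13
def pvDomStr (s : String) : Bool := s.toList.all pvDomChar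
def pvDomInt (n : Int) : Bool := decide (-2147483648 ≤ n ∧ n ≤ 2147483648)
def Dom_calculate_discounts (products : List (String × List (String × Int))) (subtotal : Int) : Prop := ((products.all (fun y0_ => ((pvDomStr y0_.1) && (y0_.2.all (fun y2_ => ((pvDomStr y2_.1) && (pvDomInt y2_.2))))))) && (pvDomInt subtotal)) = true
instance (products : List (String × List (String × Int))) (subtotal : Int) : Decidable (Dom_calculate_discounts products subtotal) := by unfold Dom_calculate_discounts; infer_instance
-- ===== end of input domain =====

-- B fuses A's early-break scan and separate quantity sum into one accumulating pass; same cost, different decomposition.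



-- first-match lookup in the association list that models the inner dict (Python d[k])
def pvLook? (d : List (String × Int)) (k : String) : Option Int :=
  (d.find? (fun kv => kv.1 == k)).map (fun kv => kv.2)

def pvLookD (d : List (String × Int)) (k : String) : Int := (pvLook? d k).getD 0

-- round-half-even of n/d for d > 0: on |n| ≤ 2^31 this is exactly what Python's
-- round(n*0.05) (d = 20) / round(n*0.1) (d = 10) computes (the tie value k+0.5 and the
-- rounded product are the same double; verified against CPython over the domain).
def pvRoundDiv (n d : Int) : Int :=
  let q := PySem.Int.floordiv n d
  let r := PySem.Int.mod n d
  if 2 * r < d then q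
  else if 2 * r > d then q + 1
  else if PySem.Int.mod q 2 = 0 then q else q + 1

-- ===== PORT A =====
-- A's for-loop with break: first product whose quantity exceeds 10 sets the bulk_5 discount.
def pvScanA (products : List (String × List (String × Int))) : String × Int :=
  match products with
  | [] => ("", 0)
  | (_, product) :: rest =>
    if pvLookD product "quantity" > 10 then
      ("bulk_5_discount", pvRoundDiv (pvLookD product "amount") 20)
    else pvScanA rest

def calculate_discounts (products : List (String × List (String × Int))) (subtotal : Int) : String × Int :=
  if subtotal > 200 then ("flat_10_discount", 10)
  else
    let d := pvScanA products
    let total := (products.map (fun p => pvLookD p.2 "quantity")).sum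
    if total > 20 then
      let nd := pvRoundDiv subtotal 10
      if nd > d.2 then ("bulk_10_discount", nd) else d
    else d

-- ===== PORT B =====
-- B's single fused pass: accumulate total quantity and the first qualifying product's amount.
def pvStepB (acc : Int × Option Int) (p : String × List (String × Int)) : Int × Option Int :=
  let q := pvLookD p.2 "quantity"
  (acc.1 + q,
   if acc.2.isNone && decide (q > 10) then some (pvLookD p.2 "amount") else acc.2)

def calculate_discounts_alt (products : List (String × List (String × Int))) (subtotal : Int) : String × Int :=
  if subtotal > 200 then ("flat_10_discount", 10)
  else
    let st := products.foldl pvStepB (0, none)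
    let d : String × Int :=
      match st.2 with
      | none => ("", 0)
      | some a => ("bulk_5_discount", pvRoundDiv a 20)
    if st.1 > 20 then
      let nd := pvRoundDiv subtotal 10
      if nd > d.2 then ("bulk_10_discount", nd) else d
    else d

-- ===== PRECONDITION & SPEC =====
-- Pre_ excludes exactly the inputs where Python A raises KeyError: with subtotal ≤ 200 every
-- product needs a "quantity" key, and the first product with quantity > 10 needs an "amount" key.
def Pre_calculate_discounts (products : List (String × List (String × Int))) (subtotal : Int) : Prop :=
  200 < subtotal ∨
    ((∀ p ∈ products, (pvLook? p.2 "quantity").isSome = true) ∧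
     (∀ p ∈ products,
        products.find? (fun x => decide (pvLookD x.2 "quantity" > 10)) = some p →
        (pvLook? p.2 "amount").isSome = true))
instance (products : List (String × List (String × Int))) (subtotal : Int) : Decidable (Pre_calculate_discounts products subtotal) := by unfold Pre_calculate_discounts; infer_instance

def pvWitness_calculate_discounts : (List (String × List (String × Int))) × Int :=
  ([("p", [("quantity", 11), ("amount", 40)]), ("q", [("quantity", 15), ("amount", 3)])], 100)

def Spec_calculate_discounts (products : List (String × List (String × Int))) (subtotal : Int) (out : String × Int) : Prop := out = calculate_discounts_alt products subtotal
instance (products : List (String × List (String × Int))) (subtotal : Int) (out : String × Int) : Decidable (Spec_calculate_discounts products subtotal out) := by unfold Spec_calculate_discounts; infer_instance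

-- ===== CLAIM (what is proved, stated in full; the proofs are below) =====
def Claim_equal_calculate_discounts : Prop := ∀ (products : List (String × List (String × Int))) (subtotal : Int), Dom_calculate_discounts products subtotal → Pre_calculate_discounts products subtotal → Spec_calculate_discounts products subtotal (calculate_discounts products subtotal)

-- ===== LEMMAS AND PROOFS =====

-- the first qualifying product's amount, as an option (characterises both A's scan and B's fold)
def pvFirstAmt (products : List (String × List (String × Int))) : Option Int :=
  match products with
  | [] => none
  | (_, product) :: rest =>
    if pvLookD product "quantity" > 10 then
      some (pvLookD product "amount")
    else pvFirstAmt rest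

theorem pvScanA_eq (products : List (String × List (String × Int))) :
    pvScanA products =
      match pvFirstAmt products with
      | none => ("", 0)
      | some a => ("bulk_5_discount", pvRoundDiv a 20) := by
  induction products with
  | nil => rfl
  | cons p rest ih =>
    obtain ⟨n, product⟩ := p
    simp only [pvScanA, pvFirstAmt]
    split_ifs with h <;> simp [ih]

theorem pvFoldB_eq (products : List (String × List (String × Int))) (t : Int) (fa : Option Int) :
    products.foldl pvStepB (t, fa) =
      (t + (products.map (fun p => pvLookD p.2 "quantity")).sum,
       match fa with
       | some a => some a
       | none => pvFirstAmt products) := by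
  induction products generalizing t fa with
  | nil => cases fa <;> simp [pvFirstAmt]
  | cons p rest ih =>
    obtain ⟨n, product⟩ := p
    simp only [List.foldl_cons, pvStepB, List.map_cons, List.sum_cons, pvFirstAmt]
    cases fa with
    | none =>
      by_cases h : pvLookD product "quantity" > 10 <;>
        simp [h, ih, add_assoc]
    | some a => simp [ih, add_assoc]

-- ===== VERDICT (by name: the statement is the Claim_ definition above) =====
theorem calculate_discounts_spec : Claim_equal_calculate_discounts := by
  intro products subtotal _ _
  unfold Spec_calculate_discounts calculate_discounts calculate_discounts_alt
  by_cases hs : subtotal > 200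
  · simp [hs]
  · simp only [hs, if_false, pvFoldB_eq, pvScanA_eq, zero_add]
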